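-- pv_equiv track=rewrite | github.com/bigdata-dude/challenge | inter_reverse_string_ignore_special_chars_golden.py | reverStringsInLine
-- ===== SOURCE A (Python) =====
-- def reverStringsInLine(s):
--     sl = s.split(' ')
--     rsl = ''
--
--     for word in sl:
--         str_word = ''
--         rev_sub_word = ''
--         for ch in word:
--
--             if ch.isalnum():
--                 str_word += ch
--             else:
--                 rev_sub_word += str_word[::-1] + ch
--                 str_word = ''
--         r_word = rev_sub_word + str_word[::-1]
--         rsl += r_word + ' '
--     return rsl
-- ===== SOURCE B (Python) =====
-- def reverStringsInLine(s):
--     # Single pass over the whole string: spaces are non-alnum, so word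
--     # boundaries fall out of the same run-flushing rule; one final ' '.
--     out = []
--     run = []
--     for ch in s:
--         if ch.isalnum():
--             run.append(ch)
--         else:
--             out.extend(reversed(run))
--             run = []
--             out.append(ch)
--     out.extend(reversed(run))
--     out.append(' ')
--     return ''.join(out)
-- ===== Notes on version B (the rewrite author's own statement) =====
-- stated objective: alternative
-- what changed: B drops the per-word split-and-rebuild: a single pass over the whole string flushes each maximal alphanumeric run reversed into one output list (the space separator is handled by the same non-alnum flush rule), with the one extra trailing space appended at the end.
import Mathlib
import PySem

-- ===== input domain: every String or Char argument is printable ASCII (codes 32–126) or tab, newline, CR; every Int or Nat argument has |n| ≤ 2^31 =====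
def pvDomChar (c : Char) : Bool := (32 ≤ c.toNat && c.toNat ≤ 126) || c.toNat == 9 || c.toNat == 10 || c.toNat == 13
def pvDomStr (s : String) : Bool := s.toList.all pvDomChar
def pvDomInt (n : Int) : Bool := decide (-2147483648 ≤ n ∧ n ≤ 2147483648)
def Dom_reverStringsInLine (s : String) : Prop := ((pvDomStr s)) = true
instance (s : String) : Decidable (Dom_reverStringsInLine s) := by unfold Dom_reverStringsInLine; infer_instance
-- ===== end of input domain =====

-- B replaces A's per-word split-and-rebuild by one pass over the whole
-- string that flushes each maximal alnum run reversed (objective: alternative).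

-- ===== PORT A =====
-- inner-loop body of A: state = (str_word, rev_sub_word); str_word[::-1] is
-- List.reverse (PySem.Str.slice?_none_none_neg_one)
def pvAstep (st : List Char × List Char) (ch : Char) : List Char × List Char :=
  if PySem.Chars.isalnum ch then (st.1 ++ [ch], st.2)
  else ([], st.2 ++ st.1.reverse ++ [ch])

def reverStringsInLine (s : String) : String :=
  let sl := PySem.Chars.splitOn s.toList [' ']
  let rsl := sl.foldl (fun rsl word =>
    let p := word.foldl pvAstep ([], [])
    let r_word := p.2 ++ p.1.reverse
    rsl ++ r_word ++ [' ']) []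
  String.ofList rsl

-- ===== PORT B =====
-- loop body of B: state = (out, run)
def pvBstep (st : List Char × List Char) (ch : Char) : List Char × List Char :=
  if PySem.Chars.isalnum ch then (st.1, st.2 ++ [ch])
  else (st.1 ++ st.2.reverse ++ [ch], [])

def reverStringsInLine_alt (s : String) : String :=
  let p := s.toList.foldl pvBstep ([], [])
  String.ofList (p.1 ++ p.2.reverse ++ [' '])

-- ===== PRECONDITION & SPEC =====
def Spec_reverStringsInLine (s : String) (out : String) : Prop := out = reverStringsInLine_alt s
instance (s : String) (out : String) : Decidable (Spec_reverStringsInLine s out) := by unfold Spec_reverStringsInLine; infer_instance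

-- ===== CLAIM (what is proved, stated in full; the proofs are below) =====
def Claim_equal_reverStringsInLine : Prop := ∀ (s : String), Dom_reverStringsInLine s → Spec_reverStringsInLine s (reverStringsInLine s)

-- ===== LEMMAS AND PROOFS =====

-- structural recursion equivalent of splitOn on a single-space separator
def pvSplit : List Char → List (List Char)
  | [] => [[]]
  | c :: rest => if c = ' ' then [] :: pvSplit rest
                 else (pvSplit rest).modifyHead (c :: ·)

lemma pvSplit_ne_nil (cs : List Char) : pvSplit cs ≠ [] := by
  cases cs with
  | nil => simp [pvSplit]
  | cons c rest =>
    simp only [pvSplit]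
    split
    · simp
    · cases h : pvSplit rest with
      | nil => exact absurd h (pvSplit_ne_nil rest)
      | cons w ws => simp [h]

lemma modifyHead_id (l : List (List Char)) : l.modifyHead (fun x => x) = l := by
  cases l <;> simp

lemma splitOn_go_eq (fuel : Nat) (l cur : List Char) (acc : List (List Char))
    (h : l.length ≤ fuel) :
    PySem.Chars.splitOn.go [' '] fuel l cur acc
      = acc.reverse ++ (pvSplit l).modifyHead (cur.reverse ++ ·) := by
  induction fuel generalizing l cur acc with
  | zero =>
    cases l with
    | nil => rw [PySem.Chars.splitOn.go.eq_def]; simp [pvSplit]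
    | cons c rest => simp at h
  | succ fuel ih =>
    cases l with
    | nil => rw [PySem.Chars.splitOn.go.eq_def]; simp [pvSplit]
    | cons c rest =>
      simp only [List.length_cons, Nat.succ_le_succ_iff] at h
      rw [PySem.Chars.splitOn.go.eq_def]
      by_cases hc : c = ' '
      · subst hc
        simp only [List.isPrefixOf, beq_self_eq_true, Bool.true_and, if_pos,
          List.length_cons, List.length_nil, List.drop_succ_cons, List.drop_zero]
        rw [ih _ _ _ h]
        simp [pvSplit, modifyHead_id]
      · simp only [List.isPrefixOf, List.isPrefixOf_nil_left, Bool.and_true]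
        rw [if_neg (by simp [Ne.symm hc])]
        rw [ih _ _ _ h]
        obtain ⟨w, ws, hw⟩ : ∃ w ws, pvSplit rest = w :: ws := by
          cases hws : pvSplit rest with
          | nil => exact absurd hws (pvSplit_ne_nil rest)
          | cons w ws => exact ⟨w, ws, rfl⟩
        simp [pvSplit, hc, hw]

lemma splitOn_eq_pvSplit (cs : List Char) :
    PySem.Chars.splitOn cs [' '] = pvSplit cs := by
  show PySem.Chars.splitOn.go [' '] (cs.length + 1) cs [] [] = _
  rw [splitOn_go_eq _ _ _ _ (by omega)]
  simp [modifyHead_id]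

-- A's per-word result, continued from inner state (st, rv)
def pvProcFrom (st rv : List Char) (w : List Char) : List Char :=
  let p := w.foldl pvAstep (st, rv)
  p.2 ++ p.1.reverse

-- the key invariant: B's single pass over cs, with pending output `out ++ rv`
-- and pending run `st`, produces exactly A's word-by-word output
lemma pass_eq (cs : List Char) : ∀ (out st rv : List Char),
    (let p := cs.foldl pvBstep (out ++ rv, st)
     p.1 ++ p.2.reverse ++ [' '])
      = out ++ (match pvSplit cs with
                | [] => []
                | w :: ws =>
                  pvProcFrom st rv w ++ [' ']
                    ++ ws.flatMap (fun w => pvProcFrom [] [] w ++ [' '])) := by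
  induction cs with
  | nil => intro out st rv; simp [pvSplit, pvProcFrom]
  | cons c rest ih =>
    intro out st rv
    by_cases ha : PySem.Chars.isalnum c = true
    · have hc : c ≠ ' ' := by
        intro h; subst h; exact absurd ha (by decide)
      simp only [List.foldl_cons, pvBstep, ha, if_pos]
      have := ih out (st ++ [c]) rv
      simp only at this
      rw [this]
      simp only [pvSplit, if_neg hc]
      obtain ⟨w, ws, hw⟩ : ∃ w ws, pvSplit rest = w :: ws := by
        cases hws : pvSplit rest with
        | nil => exact absurd hws (pvSplit_ne_nil rest)
        | cons w ws => exact ⟨w, ws, rfl⟩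
      simp [hw, pvProcFrom, pvAstep, ha]
    · rw [Bool.not_eq_true] at ha
      by_cases hc : c = ' '
      · subst hc
        simp only [List.foldl_cons, pvBstep, ha, Bool.false_eq_true, if_false]
        have := ih (out ++ rv ++ st.reverse ++ [' ']) [] []
        simp only [List.append_nil] at this ⊢
        simp only [List.append_assoc] at this ⊢
        rw [this]
        simp only [pvSplit]
        obtain ⟨w, ws, hw⟩ : ∃ w ws, pvSplit rest = w :: ws := by
          cases hws : pvSplit rest with
          | nil => exact absurd hws (pvSplit_ne_nil rest)
          | cons w ws => exact ⟨w, ws, rfl⟩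
        simp [hw, pvProcFrom]
      · simp only [List.foldl_cons, pvBstep, ha, Bool.false_eq_true, if_false]
        have := ih out [] (rv ++ st.reverse ++ [c])
        simp only [List.append_assoc] at this ⊢
        rw [this]
        simp only [pvSplit, if_neg hc]
        obtain ⟨w, ws, hw⟩ : ∃ w ws, pvSplit rest = w :: ws := by
          cases hws : pvSplit rest with
          | nil => exact absurd hws (pvSplit_ne_nil rest)
          | cons w ws => exact ⟨w, ws, rfl⟩
        simp [hw, pvProcFrom, pvAstep, ha]

-- A's foldl with an appending accumulator is a flatMap
lemma a_foldl_flatMap (ws : List (List Char)) : ∀ (init : List Char),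
    ws.foldl (fun rsl word =>
      let p := word.foldl pvAstep ([], [])
      let r_word := p.2 ++ p.1.reverse
      rsl ++ r_word ++ [' ']) init
      = init ++ ws.flatMap (fun w => pvProcFrom [] [] w ++ [' ']) := by
  induction ws with
  | nil => intro init; simp
  | cons w ws ih =>
    intro init
    simp only [List.foldl_cons, List.flatMap_cons, ih]
    simp [pvProcFrom]

-- ===== VERDICT (by name: the statement is the Claim_ definition above) =====
theorem reverStringsInLine_spec : Claim_equal_reverStringsInLine := by
  intro s _
  unfold Spec_reverStringsInLine reverStringsInLine reverStringsInLine_alt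
  simp only [splitOn_eq_pvSplit, a_foldl_flatMap, List.nil_append]
  have := pass_eq s.toList [] [] []
  simp only [List.append_nil, List.nil_append] at this
  rw [this]
  obtain ⟨w, ws, hw⟩ : ∃ w ws, pvSplit s.toList = w :: ws := by
    cases hws : pvSplit s.toList with
    | nil => exact absurd hws (pvSplit_ne_nil s.toList)
    | cons w ws => exact ⟨w, ws, rfl⟩
  simp [hw]
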